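-- pv_equiv track=rewrite | github.com/aalmir-erp/lumora | app/airbnb_ical.py | _unfold_lines
-- ===== SOURCE A (Python) =====
-- def _unfold_lines(text: str) -> list[str]:
--     """iCal spec: long lines wrap with a leading space/tab on continuation."""
--     out: list[str] = []
--     for raw in text.replace("\r\n", "\n").replace("\r", "\n").split("\n"):
--         if raw.startswith((" ", "\t")) and out:
--             out[-1] += raw[1:]
--         else:
--             out.append(raw)
--     return out
-- ===== SOURCE B (Python) =====
-- def _unfold_lines(text: str) -> list[str]:
--     """One-shot character scan: delete every newline that is immediately
--     followed by a single space/tab (together with that one space/tab),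
--     then split the folded text on newlines."""
--     s = text.replace("\r\n", "\n").replace("\r", "\n")
--     folded = []
--     i = 0
--     n = len(s)
--     while i < n:
--         if s[i] == "\n" and i + 1 < n and s[i + 1] in " \t":
--             i += 2
--         else:
--             folded.append(s[i])
--             i += 1
--     return "".join(folded).split("\n")
-- ===== Notes on version B (the rewrite author's own statement) =====
-- stated objective: alternative
-- what changed: Replaces A's stateful line-by-line accumulation (split first, then merge continuation lines into the last output line) by a one-shot character scan that deletes each newline followed by a single space/tab and only then splits on newlines.
import Mathlib
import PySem

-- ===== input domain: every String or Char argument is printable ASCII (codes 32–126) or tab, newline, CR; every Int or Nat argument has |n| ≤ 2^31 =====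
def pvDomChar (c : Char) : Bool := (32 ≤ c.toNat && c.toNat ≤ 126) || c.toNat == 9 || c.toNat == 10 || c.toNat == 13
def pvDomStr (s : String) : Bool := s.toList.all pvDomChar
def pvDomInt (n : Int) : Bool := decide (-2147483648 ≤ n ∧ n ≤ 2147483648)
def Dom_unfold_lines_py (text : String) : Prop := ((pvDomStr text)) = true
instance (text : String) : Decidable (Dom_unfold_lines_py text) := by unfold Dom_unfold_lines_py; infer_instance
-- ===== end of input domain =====

-- B replaces A's stateful line-by-line merge loop with a one-shot character scan that
-- deletes each newline followed by a single space/tab, then splits; same cost, different algorithm.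

-- ===== PORT A =====
-- A: normalize line endings, split on "\n", then fold: a line starting with space/tab
-- (while out is nonempty) is appended (minus its first char) to the last output line.
def unfold_lines_py (text : String) : List String :=
  ((PySem.Chars.splitOn
      (PySem.Chars.replace (PySem.Chars.replace text.toList ['\r', '\n'] ['\n']) ['\r'] ['\n'])
      ['\n']).foldl
    (fun out raw =>
      if (PySem.Chars.startswith raw [' '] || PySem.Chars.startswith raw ['\t']) && !out.isEmpty then
        out.dropLast ++ [out.getLast! ++ PySem.List.slice raw (some 1) none]
      else out ++ [raw])
    ([] : List (List Char))).map (fun cs => String.ofList cs)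

-- ===== PORT B =====
-- B's while loop over indices, transcribed as structural recursion on the character list:
-- i advances by 2 (dropping '\n' and the single following space/tab) or by 1 (keeping s[i]).
def pvAltScan : List Char → List Char
  | [] => []
  | '\n' :: c :: t => if c = ' ' ∨ c = '\t' then pvAltScan t else '\n' :: pvAltScan (c :: t)
  | a :: t => a :: pvAltScan t

def unfold_lines_py_alt (text : String) : List String :=
  (PySem.Chars.splitOn
      (pvAltScan
        (PySem.Chars.replace (PySem.Chars.replace text.toList ['\r', '\n'] ['\n']) ['\r'] ['\n']))
      ['\n']).map (fun cs => String.ofList cs)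

-- ===== PRECONDITION & SPEC =====
def Spec_unfold_lines_py (text : String) (out : List String) : Prop := out = unfold_lines_py_alt text
instance (text : String) (out : List String) : Decidable (Spec_unfold_lines_py text out) := by unfold Spec_unfold_lines_py; infer_instance

-- ===== CLAIM (what is proved, stated in full; the proofs are below) =====
def Claim_equal_unfold_lines_py : Prop := ∀ (text : String), Dom_unfold_lines_py text → Spec_unfold_lines_py text (unfold_lines_py text)

-- ===== LEMMAS AND PROOFS =====

def pvSplit : List Char → List (List Char)
  | [] => [[]]
  | c :: t => if c = '\n' then [] :: pvSplit t else (pvSplit t).modifyHead (c :: ·)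

theorem pvSplit_ne_nil (l : List Char) : pvSplit l ≠ [] := by
  induction l with
  | nil => simp [pvSplit]
  | cons c t ih =>
    simp only [pvSplit]
    split
    · simp
    · cases h : pvSplit t with
      | nil => exact absurd h ih
      | cons y ys => simp [List.modifyHead]

theorem pv_go_eq (l : List Char) : ∀ (fuel : Nat), l.length ≤ fuel → ∀ (cur : List Char) (acc : List (List Char)),
    PySem.Chars.splitOn.go ['\n'] fuel l cur acc
      = acc.reverse ++ (pvSplit l).modifyHead (cur.reverse ++ ·) := by
  induction l with
  | nil =>
    intro fuel _ cur acc
    rw [PySem.Chars.splitOn.go.eq_def]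
    cases fuel <;> simp [pvSplit]
  | cons c t ih =>
    intro fuel hf cur acc
    cases fuel with
    | zero => simp at hf
    | succ f =>
      rw [show PySem.Chars.splitOn.go ['\n'] (f+1) (c :: t) cur acc
            = if List.isPrefixOf ['\n'] (c :: t) = true then
                PySem.Chars.splitOn.go ['\n'] f (List.drop ['\n'].length (c :: t)) [] (cur.reverse :: acc)
              else PySem.Chars.splitOn.go ['\n'] f t (c :: cur) acc
          from by rw [PySem.Chars.splitOn.go.eq_def]]
      simp only [List.length_cons, Nat.add_le_add_iff_right] at hf
      by_cases hc : c = '\n'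
      · subst hc
        have hpre : List.isPrefixOf ['\n'] ('\n' :: t) = true := by
          simp [List.isPrefixOf]
        rw [if_pos hpre]
        simp only [List.length_cons, List.length_nil, List.drop_succ_cons, List.drop_zero]
        rw [ih f hf [] (cur.reverse :: acc)]
        cases h : pvSplit t with
        | nil => exact absurd h (pvSplit_ne_nil t)
        | cons y ys =>
          simp [pvSplit, h, List.modifyHead]
      · have hpre : List.isPrefixOf ['\n'] (c :: t) = false := by
          simp [List.isPrefixOf]
          intro h; exact absurd h.symm hc
        rw [if_neg (by simp [hpre])]
        rw [ih f hf (c :: cur) acc]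
        cases h : pvSplit t with
        | nil => exact absurd h (pvSplit_ne_nil t)
        | cons y ys =>
          simp [pvSplit, h, hc, List.modifyHead]

theorem pv_splitOn_eq (l : List Char) : PySem.Chars.splitOn l ['\n'] = pvSplit l := by
  unfold PySem.Chars.splitOn
  rw [pv_go_eq l (l.length + 1) (by omega) [] []]
  cases h : pvSplit l with
  | nil => exact absurd h (pvSplit_ne_nil l)
  | cons y ys => simp [List.modifyHead]

def pvSpaceStart : List Char → Bool
  | [] => false
  | c :: _ => c = ' ' || c = '\t'

theorem pv_startswith_eq (raw : List Char) :
    (PySem.Chars.startswith raw [' '] || PySem.Chars.startswith raw ['\t']) = pvSpaceStart raw := by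
  cases raw with
  | nil => rfl
  | cons c t =>
    simp [PySem.Chars.startswith, List.isPrefixOf, pvSpaceStart, BEq.comm]
    rfl

def pvGlue : List Char → List (List Char) → List (List Char)
  | a, [] => [a]
  | a, x :: rest => if pvSpaceStart x then pvGlue (a ++ x.drop 1) rest else a :: pvGlue x rest

theorem pv_getLast_concat (acc : List (List Char)) (a : List Char) : (acc ++ [a]).getLast! = a := by
  induction acc with
  | nil => rfl
  | cons b t ih => simp [List.getLast!]

theorem pv_foldl_eq_glue (lines : List (List Char)) :
    ∀ (acc : List (List Char)) (a : List Char),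
    lines.foldl
      (fun out raw =>
        if (PySem.Chars.startswith raw [' '] || PySem.Chars.startswith raw ['\t']) && !out.isEmpty then
          out.dropLast ++ [out.getLast! ++ PySem.List.slice raw (some 1) none]
        else out ++ [raw]) (acc ++ [a])
      = acc ++ pvGlue a lines := by
  induction lines with
  | nil => intro acc a; simp [pvGlue]
  | cons x rest ih =>
    intro acc a
    rw [List.foldl_cons]
    by_cases hx : pvSpaceStart x = true
    · rw [show ((PySem.Chars.startswith x [' '] || PySem.Chars.startswith x ['\t']) && !(acc ++ [a]).isEmpty) = true from by
          rw [pv_startswith_eq]; simp [hx]]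
      rw [if_pos rfl, pv_getLast_concat, PySem.List.slice_from x (by norm_num)]
      rw [show (acc ++ [a]).dropLast = acc from by simp]
      rw [show Int.toNat 1 = 1 from rfl]
      rw [ih acc (a ++ x.drop 1)]
      rw [show pvGlue a (x :: rest) = pvGlue (a ++ x.drop 1) rest from by
        simp [pvGlue, hx]]
    · rw [show ((PySem.Chars.startswith x [' '] || PySem.Chars.startswith x ['\t']) && !(acc ++ [a]).isEmpty) = false from by
          rw [pv_startswith_eq]; simp [hx]]
      rw [if_neg (by simp)]
      rw [show acc ++ [a] ++ [x] = (acc ++ [a]) ++ [x] from by simp]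
      rw [ih (acc ++ [a]) x]
      rw [show pvGlue a (x :: rest) = a :: pvGlue x rest from by simp [pvGlue, hx]]
      simp

theorem pvAltScan_cons (a : Char) (t : List Char) (h : a ≠ '\n' ∨ t = []) :
    pvAltScan (a :: t) = a :: pvAltScan t := by
  cases t with
  | cons c t' =>
    rcases h with h | h
    · simp [pvAltScan, h]
    · cases h
  | nil =>
    by_cases hb : a = '\n'
    · subst hb; rfl
    · simp [pvAltScan]

theorem pv_key (l : List Char) : ∀ (a y : List Char) (ys : List (List Char)),
    pvSplit l = y :: ys →
    pvGlue (a ++ y) ys = (pvSplit (pvAltScan l)).modifyHead (a ++ ·) := by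
  induction l using pvAltScan.induct with
  | case1 =>
    intro a y ys h
    obtain ⟨rfl, rfl⟩ : y = [] ∧ ys = [] := by
      have h' : ([[]] : List (List Char)) = y :: ys := h
      simpa using h'.symm
    simp [pvGlue, pvAltScan, pvSplit, List.modifyHead]
  | case2 c t hc ih =>
    intro a y ys h
    cases hsp : pvSplit t with
    | nil => exact absurd hsp (pvSplit_ne_nil t)
    | cons y' ys' =>
      have hcne : ¬ (c = '\n') := by rcases hc with h' | h' <;> simp [h']
      have h2 : pvSplit ('\n' :: c :: t) = [] :: (c :: y') :: ys' := by
        simp [pvSplit, hcne, hsp, List.modifyHead]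
      rw [h] at h2
      injection h2 with h3 h4
      subst h3; subst h4
      rw [show pvAltScan ('\n' :: c :: t) = pvAltScan t from by simp [pvAltScan, hc]]
      rw [show pvGlue (a ++ []) ((c :: y') :: ys') = pvGlue (a ++ y') ys' from by
        simp [pvGlue, pvSpaceStart, hc]]
      exact ih a y' ys' hsp
  | case3 c t hc ih =>
    intro a y ys h
    cases hsp : pvSplit (c :: t) with
    | nil => exact absurd hsp (pvSplit_ne_nil _)
    | cons y'' ys'' =>
      have h2 : pvSplit ('\n' :: c :: t) = [] :: y'' :: ys'' := by
        rw [show pvSplit ('\n' :: c :: t) = [] :: pvSplit (c :: t) from rfl, hsp]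
      rw [h] at h2
      injection h2 with h3 h4
      subst h3; subst h4
      have hns : pvSpaceStart y'' = false := by
        by_cases hcn : c = '\n'
        · subst hcn
          have : y'' = [] := by
            have h5 : ([] : List Char) :: pvSplit t = y'' :: ys'' := by
              simpa [pvSplit] using hsp
            exact (List.cons.injEq .. ▸ h5).1.symm
          simp [this, pvSpaceStart]
        · cases hsp2 : pvSplit t with
          | nil => exact absurd hsp2 (pvSplit_ne_nil t)
          | cons z zs =>
            have h5 : (c :: z) :: zs = y'' :: ys'' := by
              simpa [pvSplit, hcn, hsp2, List.modifyHead] using hsp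
            have : y'' = c :: z := (List.cons.injEq .. ▸ h5).1.symm
            subst this
            simp only [pvSpaceStart]
            simp only [not_or] at hc
            simp [hc.1, hc.2]
      rw [show pvAltScan ('\n' :: c :: t) = '\n' :: pvAltScan (c :: t) from by
        simp [pvAltScan, hc]]
      rw [show pvGlue (a ++ []) (y'' :: ys'') = a :: pvGlue y'' ys'' from by
        simp [pvGlue, hns]]
      have hrec := ih [] y'' ys'' hsp
      simp only [List.nil_append] at hrec
      rw [show pvSplit ('\n' :: pvAltScan (c :: t)) = [] :: pvSplit (pvAltScan (c :: t)) from by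
        simp [pvSplit]]
      cases hq : pvSplit (pvAltScan (c :: t)) with
      | nil => exact absurd hq (pvSplit_ne_nil _)
      | cons q qs =>
        rw [hq] at hrec
        simp only [List.modifyHead] at hrec ⊢
        rw [hrec]
        simp
  | case4 b t h1 ih =>
    intro a y ys h
    have hbt : b ≠ '\n' ∨ t = [] := by
      by_cases hb : b = '\n'
      · right
        cases t with
        | nil => rfl
        | cons c t' => exact absurd (h1 c t' hb rfl) not_false
      · left; exact hb
    rw [pvAltScan_cons b t hbt]
    by_cases hb : b = '\n'
    · subst hb
      obtain rfl : t = [] := by rcases hbt with h' | h' <;> [exact absurd rfl h'; exact h']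
      obtain ⟨rfl, rfl⟩ : y = [] ∧ ys = [[]] := by
        have h' : ([[], []] : List (List Char)) = y :: ys := h
        simpa using h'.symm
      simp [pvGlue, pvSpaceStart, pvAltScan, pvSplit, List.modifyHead]
    · cases hsp : pvSplit t with
      | nil => exact absurd hsp (pvSplit_ne_nil t)
      | cons w ws =>
        have h2 : pvSplit (b :: t) = (b :: w) :: ws := by
          simp [pvSplit, hb, hsp, List.modifyHead]
        rw [h] at h2
        injection h2 with h3 h4
        rw [h3, h4]
        have hrec := ih (a ++ [b]) w ws hsp
        rw [show pvSplit (b :: pvAltScan t) = (pvSplit (pvAltScan t)).modifyHead (b :: ·) from by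
          simp [pvSplit, hb]]
        cases hq : pvSplit (pvAltScan t) with
        | nil => exact absurd hq (pvSplit_ne_nil _)
        | cons q qs =>
          rw [hq] at hrec
          simp only [List.modifyHead] at hrec ⊢
          rw [show a ++ b :: w = (a ++ [b]) ++ w from by simp]
          rw [hrec]
          simp

-- ===== VERDICT (by name: the statement is the Claim_ definition above) =====
theorem unfold_lines_py_spec : Claim_equal_unfold_lines_py := by
  intro text _
  unfold Spec_unfold_lines_py unfold_lines_py unfold_lines_py_alt
  rw [pv_splitOn_eq, pv_splitOn_eq]
  cases h : pvSplit (PySem.Chars.replace (PySem.Chars.replace text.toList ['\r', '\n'] ['\n']) ['\r'] ['\n']) with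
  | nil => exact absurd h (pvSplit_ne_nil _)
  | cons x rest =>
    congr 1
    rw [List.foldl_cons]
    rw [show ((PySem.Chars.startswith x [' '] || PySem.Chars.startswith x ['\t']) && !(List.isEmpty ([] : List (List Char)))) = false from by simp]
    rw [if_neg (by simp)]
    rw [pv_foldl_eq_glue rest [] x]
    have hk := pv_key _ [] x rest h
    simp only [List.nil_append] at hk ⊢
    rw [hk]
    cases hq : pvSplit (pvAltScan (PySem.Chars.replace (PySem.Chars.replace text.toList ['\r', '\n'] ['\n']) ['\r'] ['\n'])) with
    | nil => exact absurd hq (pvSplit_ne_nil _)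
    | cons q qs => simp [List.modifyHead]
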